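-- pv_equiv track=rewrite | github.com/rehanhub78/MACHINE-LEARNING | 1. PYTHON CODE/5.Strings (Basic Logic Building/2. Counting & Character Analysis/7.Question.py | count_alphabets
-- ===== SOURCE A (Python) =====
-- def count_alphabets(string):
--     before_m = 0
--     after_m = 0
--     found_m = False
--     for char in string:
--         if char == 'm':
--             found_m = True
--         elif char.isalpha():
--             if not found_m:
--                 before_m += 1
--             else:
--                 after_m += 1
--     return before_m, after_m
-- ===== SOURCE B (Python) =====
-- def count_alphabets(string):
--     head, _, tail = string.partition('m')
--     before = sum(1 for c in head if c.isalpha())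
--     after = sum(1 for c in tail if c.isalpha() and c != 'm')
--     return before, after
-- ===== Notes on version B (the rewrite author's own statement) =====
-- stated objective: idiomatic
-- what changed: Replaces the single flag-driven state-machine pass with str.partition at the first 'm' followed by two independent counts over the head and tail substrings.
import Mathlib
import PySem

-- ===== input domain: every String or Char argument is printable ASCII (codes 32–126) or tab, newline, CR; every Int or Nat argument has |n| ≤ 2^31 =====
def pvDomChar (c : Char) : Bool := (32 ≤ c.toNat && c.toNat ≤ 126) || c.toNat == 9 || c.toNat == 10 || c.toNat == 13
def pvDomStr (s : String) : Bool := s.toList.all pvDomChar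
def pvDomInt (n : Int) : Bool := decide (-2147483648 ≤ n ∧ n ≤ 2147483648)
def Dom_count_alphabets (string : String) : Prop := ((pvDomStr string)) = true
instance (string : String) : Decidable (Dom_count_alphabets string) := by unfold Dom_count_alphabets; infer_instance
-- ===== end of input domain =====

-- B replaces A's single flag-driven pass with partition-at-first-'m' and two independent counts (idiomatic; same return value).

-- ===== PORT A =====
-- the loop body of A's for-loop over (before_m, after_m, found_m)
def caStep (st : (Int × Int) × Bool) (char : Char) : (Int × Int) × Bool :=
  if char = 'm' then (st.1, true)
  else if PySem.Chars.isalpha char then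
    if !st.2 then ((st.1.1 + 1, st.1.2), st.2) else ((st.1.1, st.1.2 + 1), st.2)
  else st

def count_alphabets (string : String) : Int × Int :=
  (string.toList.foldl caStep ((0, 0), false)).1

-- ===== PORT B =====
def count_alphabets_alt (string : String) : Int × Int :=
  let l := string.toList
  let head := l.takeWhile (fun c => c != 'm')      -- string.partition('m')
  let tail := (l.dropWhile (fun c => c != 'm')).drop 1
  ((head.countP (fun c => PySem.Chars.isalpha c) : Int),
   (tail.countP (fun c => PySem.Chars.isalpha c && c != 'm') : Int))

-- ===== PRECONDITION & SPEC =====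
def Spec_count_alphabets (string : String) (out : Int × Int) : Prop := out = count_alphabets_alt string
instance (string : String) (out : Int × Int) : Decidable (Spec_count_alphabets string out) := by unfold Spec_count_alphabets; infer_instance

-- ===== CLAIM (what is proved, stated in full; the proofs are below) =====
def Claim_equal_count_alphabets : Prop := ∀ (string : String), Dom_count_alphabets string → Spec_count_alphabets string (count_alphabets string)

-- ===== LEMMAS AND PROOFS =====

theorem caStep_found (l : List Char) : ∀ (b a : Int),
    l.foldl caStep ((b, a), true)
      = ((b, a + (l.countP (fun c => PySem.Chars.isalpha c && c != 'm') : Int)), true) := by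
  induction l with
  | nil => intro b a; simp
  | cons c t ih =>
    intro b a
    by_cases hm : c = 'm'
    · simp [caStep, hm, ih]
    · by_cases ha : PySem.Chars.isalpha c = true
      · simp [caStep, hm, ha, ih]
        ring
      · simp [caStep, hm, ha, ih]

theorem caStep_unfound (l : List Char) : ∀ (b a : Int),
    (l.foldl caStep ((b, a), false)).1
      = (b + ((l.takeWhile (fun c => c != 'm')).countP (fun c => PySem.Chars.isalpha c) : Int),
         a + (((l.dropWhile (fun c => c != 'm')).drop 1).countP
            (fun c => PySem.Chars.isalpha c && c != 'm') : Int)) := by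
  induction l with
  | nil => intro b a; simp
  | cons c t ih =>
    intro b a
    by_cases hm : c = 'm'
    · simp [caStep, hm, caStep_found]
    · by_cases ha : PySem.Chars.isalpha c = true
      · simp [caStep, hm, ha, ih]
        ring
      · simp [caStep, hm, ha, ih]

-- ===== VERDICT (by name: the statement is the Claim_ definition above) =====
theorem count_alphabets_spec : Claim_equal_count_alphabets := by
  intro s _
  show _ = _
  simp [count_alphabets, count_alphabets_alt, caStep_unfound]
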